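-- pv_equiv track=rewrite | github.com/adkinsbl/TopCoder | 14742/GravityPuzzleEasy.py | solve
-- ===== SOURCE A (Python) =====
-- def solve(board: [str]) -> [str]:
-- 	rows = len(board)
-- 	cols = len(board[0])
--
-- 	hashCounts = []
-- 	for i in range(0,cols):
-- 		hashCount = 0
-- 		for j in range(0,rows):
-- 			if board[j][i] == '#': hashCount += 1
-- 		hashCounts.append(hashCount)
-- 	finalBoard = []
-- 	for i in reversed(range(0,rows)):
-- 		level = rows
-- 		finalRow = ""
-- 		for j in range(0,cols):
-- 			if hashCounts[j] >= i+1: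
-- 				finalRow += "#"
-- 			else:
-- 				finalRow += "."
-- 		finalBoard.append(finalRow)
-- 	return(finalBoard)
-- ===== SOURCE B (Python) =====
-- def solve(board):
--     rows = len(board)
--     cols = len(board[0])
--     columns = []
--     for j in range(cols):
--         k = sum(1 for r in board if r[j] == '#')
--         columns.append('.' * (rows - k) + '#' * k)
--     return [''.join(c[i] for c in columns) for i in range(rows)]
-- ===== Notes on version B (the rewrite author's own statement) =====
-- stated objective: alternative
-- what changed: B builds each finished column directly as '.'*(rows-k)+'#'*k from its hash count and then transposes the columns into rows, instead of A's row-by-row reconstruction from a counts table over a reversed row index.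
import Mathlib
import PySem

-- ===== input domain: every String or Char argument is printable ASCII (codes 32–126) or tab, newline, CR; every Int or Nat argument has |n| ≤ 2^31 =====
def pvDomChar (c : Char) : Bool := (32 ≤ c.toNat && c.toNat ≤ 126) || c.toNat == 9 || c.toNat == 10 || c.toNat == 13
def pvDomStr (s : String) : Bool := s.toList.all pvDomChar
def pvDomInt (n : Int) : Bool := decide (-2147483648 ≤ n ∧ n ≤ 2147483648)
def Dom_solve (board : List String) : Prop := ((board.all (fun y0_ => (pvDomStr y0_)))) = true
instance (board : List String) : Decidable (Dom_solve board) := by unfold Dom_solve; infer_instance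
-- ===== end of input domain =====

-- B builds each finished column as '.'*(rows-k)+'#'*k from its hash count and transposes, instead of A's row-by-row rebuild; alternative decomposition, same cost.


-- ===== PORT A =====
-- board[j][i] under Pre_solve is always in range; the ' ' default is never hit there.
def pvCharAt (board : List String) (j i : Nat) : Char :=
  ((board.getD j "").toList.getD i ' ')

def solve (board : List String) : List String :=
  let rows := board.length
  let cols := (board.getD 0 "").length
  let hashCounts : List Nat :=
    (List.range cols).map (fun i =>
      (List.range rows).foldl (fun acc j => if pvCharAt board j i = '#' then acc + 1 else acc) 0)
  ((List.range rows).reverse).map (fun i =>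
    String.mk ((List.range cols).foldl
      (fun row j => row ++ [if hashCounts.getD j 0 ≥ i + 1 then '#' else '.']) []))

-- ===== PORT B =====
def solve_alt (board : List String) : List String :=
  let rows := board.length
  let cols := (board.getD 0 "").length
  let columns : List (List Char) :=
    (List.range cols).map (fun j =>
      let k := board.countP (fun r => r.toList.getD j ' ' = '#')
      List.replicate (rows - k) '.' ++ List.replicate k '#')
  (List.range rows).map (fun i => String.mk (columns.map (fun c => c.getD i ' ')))

-- ===== PRECONDITION & SPEC =====
-- Pre_solve excludes exactly the inputs where Python A raises IndexError: the empty board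
-- (board[0]) and boards where some row is shorter than the first row (board[j][i]).
def Pre_solve (board : List String) : Prop :=
  board ≠ [] ∧ ∀ s ∈ board, (board.getD 0 "").length ≤ s.length
instance (board : List String) : Decidable (Pre_solve board) := by unfold Pre_solve; infer_instance
def pvWitness_solve : List String := ["#.", ".#"]

def Spec_solve (board : List String) (out : List String) : Prop := out = solve_alt board
instance (board : List String) (out : List String) : Decidable (Spec_solve board out) := by unfold Spec_solve; infer_instance

-- ===== CLAIM (what is proved, stated in full; the proofs are below) =====
def Claim_equal_solve : Prop := ∀ (board : List String), Dom_solve board → Pre_solve board → Spec_solve board (solve board)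

-- ===== LEMMAS AND PROOFS =====

-- A's inner counting loop over row indices equals B's countP over the rows themselves.
theorem pv_count_foldl (board : List String) (i : Nat) :
    (List.range board.length).foldl
      (fun acc j => if pvCharAt board j i = '#' then acc + 1 else acc) 0
    = board.countP (fun r => r.toList.getD i ' ' = '#') := by
  induction board using List.reverseRecOn with
  | nil => simp
  | append_singleton xs x ih =>
      simp only [List.length_append, List.length_singleton, List.range_succ,
        List.foldl_append, List.countP_append, List.foldl_cons, List.foldl_nil]
      have h1 : ∀ j, j < xs.length → pvCharAt (xs ++ [x]) j i = pvCharAt xs j i := by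
        intro j hj
        simp [pvCharAt, List.getD, List.getElem?_append_left hj]
      have h2 : (List.range xs.length).foldl
          (fun acc j => if pvCharAt (xs ++ [x]) j i = '#' then acc + 1 else acc) 0
          = (List.range xs.length).foldl
          (fun acc j => if pvCharAt xs j i = '#' then acc + 1 else acc) 0 := by
        apply PySem.List.foldl_congr_mem
        intro acc j hj
        rw [h1 j (List.mem_range.mp hj)]
      have h3 : pvCharAt (xs ++ [x]) xs.length i = x.toList.getD i ' ' := by
        simp [pvCharAt, List.getD]
      rw [h2, ih, h3]
      simp [List.countP_singleton]
      split_ifs <;> simp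

theorem pv_countP_le (board : List String) (i : Nat) :
    board.countP (fun r => r.toList.getD i ' ' = '#') ≤ board.length :=
  List.countP_le_length

-- element of '.'*(rows-k) ++ '#'*k
theorem pv_col_get (rows k i : Nat) (hk : k ≤ rows) (hi : i < rows) :
    (List.replicate (rows - k) '.' ++ List.replicate k '#').getD i ' '
    = if k ≥ rows - i then '#' else '.' := by
  by_cases h : i < rows - k
  · rw [List.getD_eq_getElem?_getD, List.getElem?_append_left (by simpa using h)]
    simp [h]
    omega
  · have h1 : rows - k ≤ i := Nat.le_of_not_lt h
    rw [List.getD_eq_getElem?_getD, List.getElem?_append_right (by simpa using h1)]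
    simp only [List.length_replicate]
    have h2 : i - (rows - k) < k := by omega
    simp [h2]
    omega

-- ===== VERDICT (by name: the statement is the Claim_ definition above) =====
theorem solve_spec : Claim_equal_solve := by
  intro board _ _
  unfold Spec_solve solve solve_alt
  simp only [PySem.List.foldl_append_singleton_eq_map, List.nil_append]
  set rows := board.length with hrows
  set cols := (board.getD 0 "").length with hcols
  set cnt : Nat → Nat := fun i => board.countP (fun r => r.toList.getD i ' ' = '#') with hcnt
  have hc : (List.range cols).map (fun i =>
      (List.range rows).foldl (fun acc j => if pvCharAt board j i = '#' then acc + 1 else acc) 0)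
      = (List.range cols).map cnt :=
    List.map_congr_left (fun i _ => pv_count_foldl board i)
  rw [hc]
  apply List.ext_getElem
  · simp
  · intro p hp1 hp2
    simp only [List.length_map, List.length_reverse, List.length_range] at hp1 hp2
    rw [List.getElem_map, List.getElem_map, List.getElem_reverse, List.getElem_range,
        List.getElem_range, List.length_range]
    congr 1
    apply List.ext_getElem
    · simp
    · intro q hq1 hq2
      simp only [List.length_map, List.length_range] at hq1 hq2
      rw [List.getElem_map, List.getElem_map, List.getElem_map, List.getElem_range]
      have hg : (List.map cnt (List.range cols)).getD q 0 = cnt q := by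
        simp [List.getD_eq_getElem?_getD, hq1]
      rw [hg, pv_col_get rows (cnt q) p (pv_countP_le board q) hp1]
      have h : (rows - 1 - p) + 1 = rows - p := by omega
      rw [h]
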